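-- pv_equiv track=rewrite | github.com/sheputis/challenges | advent_of_code/2025/day2/compare_substrings.py | compare_substrings
-- ===== SOURCE A (Python) =====
-- def compare_substrings(size: int, string: str, n: int):
--     """
--     Docstring for compare_substrings
--
--     :param size: Size of the +string+
--     :param string: The +string+ itself
--     :param n: The number of partitions that the string is split into
--     """
--     partition_len = int(size / n)
--     partition = string[0:partition_len]
--     for k in range(1, n):
--         start_index = k * partition_len
--         end_index   = start_index + partition_len
--         if partition != string[start_index:end_index]:
--             return False
--     return True
-- ===== SOURCE B (Python) =====
-- def compare_substrings(size, string, n):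
--     partition_len = int(size / n)
--     first = string[0:partition_len]
--     if len(first) * n > len(string):
--         return False
--     return first * n == string[0:partition_len * n]
-- ===== Notes on version B (the rewrite author's own statement) =====
-- stated objective: simpler
-- what changed: Replaces the partition-by-partition loop with a single comparison: the n-fold repetition of the first partition against the prefix string[:partition_len*n].
-- intended difference: For n < 0 A's loop range(1,n) is empty so A returns True for every string; B returns False exactly when the prefix string[:partition_len*n] it compares the empty repetition against is nonempty, the intended rejection of a nonsensical negative partition count. — e.g. on compare_substrings(4, "abcd", -2): A returns true, B returns false
import Mathlib
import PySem

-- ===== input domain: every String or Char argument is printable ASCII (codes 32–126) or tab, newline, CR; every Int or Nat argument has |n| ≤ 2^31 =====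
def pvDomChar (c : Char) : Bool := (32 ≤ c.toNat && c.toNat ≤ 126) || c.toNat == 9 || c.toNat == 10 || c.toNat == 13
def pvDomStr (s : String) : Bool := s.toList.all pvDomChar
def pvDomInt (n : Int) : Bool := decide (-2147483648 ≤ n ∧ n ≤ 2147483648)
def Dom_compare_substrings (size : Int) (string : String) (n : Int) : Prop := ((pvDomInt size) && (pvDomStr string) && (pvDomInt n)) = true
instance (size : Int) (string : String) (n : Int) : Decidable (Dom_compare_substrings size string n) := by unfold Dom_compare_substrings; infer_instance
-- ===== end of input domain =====

-- B replaces A's partition-by-partition loop by one comparison of the n-fold repetition of the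
-- first partition with the prefix string[:partition_len*n] (objective: simpler).

-- ===== PORT A =====
-- 'for k in range(1, n): if partition != string[start:end]: return False' / 'return True',
-- as the early-returning loop it is
def pv_compare_loop (s : List Char) (partition : List Char) (partition_len : Int) :
    Nat → Int → Bool
  | 0, _ => true
  | fuel + 1, k =>
    let start_index := k * partition_len
    let end_index := start_index + partition_len
    if partition == PySem.List.slice s (some start_index) (some end_index) then
      pv_compare_loop s partition partition_len fuel (k + 1)
    else false

def compare_substrings (size : Int) (string : String) (n : Int) : Bool :=
  let s := string.toList
  let partition_len := PySem.Int.truncdiv size n   -- int(size / n): exact for |size|, |n| ≤ 2^31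
  let partition := PySem.List.slice s (some 0) (some partition_len)
  pv_compare_loop s partition partition_len (n - 1).toNat 1

-- ===== PORT B =====
def compare_substrings_alt (size : Int) (string : String) (n : Int) : Bool :=
  let s := string.toList
  let partition_len := PySem.Int.truncdiv size n   -- int(size / n): exact for |size|, |n| ≤ 2^31
  let first := PySem.List.slice s none (some partition_len)
  -- len(first) * n > len(string)
  if (first.length : Int) * n > (s.length : Int) then false
  else
    -- 'first * n': Python string repetition (CPython builds len(first)*n characters, so
    -- '' * n costs O(1); the same shortcut keeps this port evaluable — the value is identical)
    (if first.isEmpty then [] else PySem.List.pyRepeat first n)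
      == PySem.List.slice s none (some (partition_len * n))

-- ===== PRECONDITION & SPEC =====
-- Pre_ excludes exactly n = 0, on which A raises ZeroDivisionError in 'int(size / n)'.
def Pre_compare_substrings (size : Int) (string : String) (n : Int) : Prop := n ≠ 0
instance (size : Int) (string : String) (n : Int) : Decidable (Pre_compare_substrings size string n) := by unfold Pre_compare_substrings; infer_instance

def pvWitness_compare_substrings : Int × String × Int := (6, "abcabc", 2)

-- For n < 0 A's loop range(1,n) is empty so A returns True for every string; B returns False exactly
-- when the prefix string[:partition_len*n] it compares the empty repetition against is nonempty,
-- the intended rejection of a nonsensical negative partition count.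
def D_compare_substrings (size : Int) (string : String) (n : Int) : Prop :=
  n < 0 ∧ ((0 < Int.tdiv size n * n ∧ string.toList ≠ []) ∨
           (Int.tdiv size n * n < 0 ∧ 0 < (string.toList.length : Int) + Int.tdiv size n * n))
instance (size : Int) (string : String) (n : Int) : Decidable (D_compare_substrings size string n) := by unfold D_compare_substrings; infer_instance

def Spec_compare_substrings (size : Int) (string : String) (n : Int) (out : Bool) : Prop := ¬ D_compare_substrings size string n → out = compare_substrings_alt size string n
instance (size : Int) (string : String) (n : Int) (out : Bool) : Decidable (Spec_compare_substrings size string n out) := by unfold Spec_compare_substrings; infer_instance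

def pvDiffWitness_compare_substrings : Int × String × Int := (4, "abcd", -2)
def pvDiffWitnessOut_compare_substrings : Bool × Bool := (true, false)

-- ===== CLAIM (what is proved, stated in full; the proofs are below) =====
def Claim_unchanged_compare_substrings : Prop := ∀ (size : Int) (string : String) (n : Int), Dom_compare_substrings size string n → Pre_compare_substrings size string n → Spec_compare_substrings size string n (compare_substrings size string n)
def Claim_changed_compare_substrings : Prop := Dom_compare_substrings (pvDiffWitness_compare_substrings.1) (pvDiffWitness_compare_substrings.2.1) (pvDiffWitness_compare_substrings.2.2) ∧ Pre_compare_substrings (pvDiffWitness_compare_substrings.1) (pvDiffWitness_compare_substrings.2.1) (pvDiffWitness_compare_substrings.2.2) ∧ D_compare_substrings (pvDiffWitness_compare_substrings.1) (pvDiffWitness_compare_substrings.2.1) (pvDiffWitness_compare_substrings.2.2) ∧ compare_substrings (pvDiffWitness_compare_substrings.1) (pvDiffWitness_compare_substrings.2.1) (pvDiffWitness_compare_substrings.2.2) = pvDiffWitnessOut_compare_substrings.1 ∧ compare_substrings_alt (pvDiffWitness_compare_substrings.1) (pvDiffWitness_compare_substrings.2.1) (pvDiffWitness_compare_substrings.2.2)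 = pvDiffWitnessOut_compare_substrings.2 ∧ pvDiffWitnessOut_compare_substrings.1 ≠ pvDiffWitnessOut_compare_substrings.2
def Claim_exact_compare_substrings : Prop := ∀ (size : Int) (string : String) (n : Int), Dom_compare_substrings size string n → Pre_compare_substrings size string n → D_compare_substrings size string n → compare_substrings size string n ≠ compare_substrings_alt size string n

-- ===== LEMMAS AND PROOFS =====

-- xs[:b] for an arbitrary-sign bound, as one take
lemma pv_slice_to_cases {α : Type} (xs : List α) (b : Int) :
    PySem.List.slice xs none (some b) =
      if 0 ≤ b then xs.take b.toNat else xs.take (xs.length - (-b).toNat) := by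
  split_ifs with h
  · exact PySem.List.slice_to xs h
  · have hk : 0 < (-b).toNat := by omega
    have h2 := PySem.List.slice_to_neg_natCast xs (-b).toNat hk
    rw [show -(((-b).toNat : Nat) : Int) = b from by omega] at h2
    exact h2

-- xs[a:b] is empty when b ≤ a
lemma pv_slice_nil_of_le {α : Type} (xs : List α) {a b : Int} (h : b ≤ a)
    (h2 : a < 0 ∨ 0 ≤ b) :
    PySem.List.slice xs (some a) (some b) = [] := by
  have hlen := PySem.List.length_slice xs a b
  have hmono : PySem.List.clampIdx xs.length b ≤ PySem.List.clampIdx xs.length a := by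
    simp only [PySem.List.clampIdx]
    rcases h2 with h2 | h2 <;> split_ifs <;> omega
  apply List.eq_nil_of_length_eq_zero
  rw [hlen]
  exact Nat.sub_eq_zero_of_le hmono

lemma pv_flatten_replicate_length {α : Type} (m : Nat) (f : List α) :
    (List.replicate m f).flatten.length = m * f.length := by
  simp [List.length_flatten, List.map_replicate, List.sum_replicate, smul_eq_mul]

-- Core: the repeated first partition equals the block of m partitions starting at k*P
-- iff every one of those partitions equals f.
lemma pv_core {α : Type} (s f : List α) (P : Nat) (hf : f.length = min P s.length) :
    ∀ m k : Nat,
      ((List.replicate m f).flatten = (s.drop (k*P)).take (m*P)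
        ↔ ∀ j : Nat, k ≤ j → j < k + m → (s.drop (j*P)).take P = f) := by
  intro m
  induction m with
  | zero =>
    intro k
    constructor
    · intro _ j h1 h2; omega
    · intro _; simp
  | succ m ih =>
    intro k
    have hsplit : (s.drop (k*P)).take ((m+1)*P)
        = (s.drop (k*P)).take P ++ (s.drop ((k+1)*P)).take (m*P) := by
      have h1 : (m+1)*P = P + m*P := by ring
      rw [h1, List.take_add, List.drop_drop]
      have h2 : k*P + P = (k+1)*P := by ring
      rw [h2]
    have hflat : (List.replicate (m+1) f).flatten = f ++ (List.replicate m f).flatten := by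
      simp [List.replicate_succ]
    rw [hflat, hsplit]
    constructor
    · intro h
      have hbl : ((s.drop (k*P)).take P).length = min P (s.length - k*P) := by
        simp [List.length_take, List.length_drop]
      by_cases hbf : ((s.drop (k*P)).take P).length = f.length
      · have hbev : (s.drop (k*P)).take P = f := by
          have h2 := congrArg (List.take f.length) h
          rw [List.take_append_of_le_length (le_refl f.length), List.take_length,
              List.take_append_of_le_length (le_of_eq hbf.symm), ← hbf, List.take_length] at h2
          exact h2.symm
        have hFT : (List.replicate m f).flatten = (s.drop ((k+1)*P)).take (m*P) := by
          rw [hbev] at h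
          exact List.append_cancel_left h
        have hrest := (ih (k+1)).mp hFT
        intro j hj1 hj2
        rcases Nat.eq_or_lt_of_le hj1 with hjk | hjk
        · rw [← hjk]; exact hbev
        · exact hrest j hjk (by omega)
      · exfalso
        have hkP : (k+1)*P = k*P + P := by ring
        rw [hbl, hf] at hbf
        have hlen := congrArg List.length h
        simp only [List.length_append, pv_flatten_replicate_length, List.length_take,
          List.length_drop, hf] at hlen
        -- b is shorter than f, so s has run out before k*P + P: the tail is empty, lengths cannot match
        omega
    · intro hall
      have hb' : (s.drop (k*P)).take P = f := hall k (le_refl k) (by omega)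
      have hFT := (ih (k+1)).mpr (fun j h1 h2 => hall j (by omega) (by omega))
      rw [hb', hFT]

-- unfolding of the loop of port A into an 'all' over the range it traverses
lemma pv_loopA_fuel (s partition : List Char) (p n : Int) :
    ∀ fuel : Nat, ∀ k : Int, (n - k).toNat = fuel →
      pv_compare_loop s partition p fuel k =
        ((PySem.List.pyRange k n).all fun j =>
          partition == PySem.List.slice s (some (j * p)) (some (j * p + p))) := by
  intro fuel
  induction fuel with
  | zero =>
    intro k hk
    have hnk : ¬ k < n := by omega
    have hnil : PySem.List.pyRange k n = [] := by
      rw [List.eq_nil_iff_forall_not_mem]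
      intro x hx
      rw [PySem.List.mem_pyRange_one] at hx
      omega
    rw [pv_compare_loop, hnil]
    simp
  | succ m ih =>
    intro k hk
    have hkn : k < n := by omega
    rw [pv_compare_loop, PySem.List.pyRange_one_cons hkn, List.all_cons]
    cases hcmp : (partition == PySem.List.slice s (some (k * p)) (some (k * p + p)))
    · simp [hcmp]
    · simp only [hcmp, if_true, Bool.true_and]
      exact ih (k + 1) (by omega)

lemma pv_loopA_all (s partition : List Char) (p n k : Int) :
    pv_compare_loop s partition p ((n - k).toNat) k =
      ((PySem.List.pyRange k n).all fun j =>
        partition == PySem.List.slice s (some (j * p)) (some (j * p + p))) :=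
  pv_loopA_fuel s partition p n (n - k).toNat k rfl

-- port B computes exactly 'first * n == string[:partition_len * n]'
lemma pv_alt_unfold (size : Int) (string : String) (n : Int) :
    compare_substrings_alt size string n =
      ((List.replicate n.toNat
          (PySem.List.slice string.toList none (some (PySem.Int.truncdiv size n)))).flatten ==
        PySem.List.slice string.toList none (some (PySem.Int.truncdiv size n * n))) := by
  simp only [compare_substrings_alt]
  set s := string.toList with hs
  set p := PySem.Int.truncdiv size n with hp
  set first := PySem.List.slice s none (some p) with hfirst
  by_cases hg : (first.length : Int) * n > (s.length : Int)
  · rw [if_pos hg]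
    have hn1 : 0 < n := by
      by_contra hc
      exact absurd hg (not_lt.mpr (le_trans
        (mul_nonpos_of_nonneg_of_nonpos (by positivity) (by omega)) (by positivity)))
    have hlenflat : ((List.replicate n.toNat first).flatten.length : Int)
        = (first.length : Int) * n := by
      rw [pv_flatten_replicate_length]
      push_cast
      rw [Int.toNat_of_nonneg (le_of_lt hn1)]
      ring
    have hlenslice : ((PySem.List.slice s none (some (p * n))).length : Int)
        ≤ (s.length : Int) := by
      rw [pv_slice_to_cases]
      split_ifs <;> simp [List.length_take] <;> omega
    symm
    rw [beq_eq_false_iff_ne]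
    intro hcon
    have := congrArg List.length hcon
    omega
  · rw [if_neg hg]
    by_cases hf : first.isEmpty
    · rw [List.isEmpty_iff] at hf
      have hrep : (List.replicate n.toNat (first)).flatten = [] := by
        rw [List.flatten_eq_nil_iff]
        intro l hl
        rw [List.eq_of_mem_replicate hl, hf]
      rw [if_pos (by rw [List.isEmpty_iff]; exact hf), hrep]
    · rw [if_neg hf]
      rfl

-- ===== VERDICT (by name: the statement is the Claim_ definition above) =====
theorem compare_substrings_spec : Claim_unchanged_compare_substrings := by
  intro size string n _ hPre hD
  unfold Pre_compare_substrings at hPre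
  unfold D_compare_substrings at hD
  simp only [compare_substrings, pv_alt_unfold, pv_loopA_all,
    show PySem.Int.truncdiv = Int.tdiv from rfl]
  set s := string.toList with hs
  set p := Int.tdiv size n with hp
  rcases lt_trichotomy n 0 with hn | hn | hn
  · -- n < 0 : A's range is empty, so A = true; ¬D forces B's right-hand slice empty, so B = true
    have hA : (PySem.List.pyRange 1 n).all (fun k =>
        PySem.List.slice s (some 0) (some p) ==
          PySem.List.slice s (some (k * p)) (some (k * p + p))) = true := by
      rw [List.all_eq_true]
      intro x hx
      rw [PySem.List.mem_pyRange_one] at hx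
      omega
    have hNn : n.toNat = 0 := by omega
    have hD' : ¬ ((0 < p * n ∧ s ≠ []) ∨ (p * n < 0 ∧ 0 < (s.length : Int) + p * n)) :=
      fun hc => hD ⟨hn, hc⟩
    rw [not_or] at hD'
    obtain ⟨hD1, hD2⟩ := hD'
    have hslice : PySem.List.slice s none (some (p * n)) = [] := by
      rw [pv_slice_to_cases]
      split_ifs with hm
      · rcases eq_or_lt_of_le hm with hm0 | hm0
        · simp [← hm0]
        · have hsnil : s = [] := by
            by_contra hne
            exact hD1 ⟨hm0, hne⟩
          simp [hsnil]
      · have hL : (s.length : Int) + p * n ≤ 0 := by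
          by_contra hc
          exact hD2 ⟨by omega, by omega⟩
        have hz : s.length - (-(p * n)).toNat = 0 := by omega
        rw [hz]
        simp
    rw [hA, hNn, hslice]
    simp
  · omega
  · -- 0 < n
    have hNpos : 0 < n.toNat := by omega
    set N := n.toNat with hN
    have hnN : n = (N : Int) := by omega
    rcases le_or_gt 0 p with hp0 | hp0
    · -- 0 ≤ partition_len : the real case
      set P := p.toNat with hP
      have hpP : p = (P : Int) := by omega
      have e1 : PySem.List.slice s (some 0) (some p) = s.take P := by
        rw [PySem.List.slice_zero_start, hpP, PySem.List.slice_to_natCast]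
      have e2 : PySem.List.slice s none (some p) = s.take P := by
        rw [hpP, PySem.List.slice_to_natCast]
      have e3 : PySem.List.slice s none (some (p * n)) = s.take (N * P) := by
        rw [show p * n = ((N * P : Nat) : Int) from by rw [hpP, hnN]; push_cast; ring,
          PySem.List.slice_to_natCast]
      have eb : ∀ j : Nat, PySem.List.slice s (some ((j : Int) * p)) (some ((j : Int) * p + p))
          = (s.drop (j * P)).take P := by
        intro j
        rw [hpP, show ((j : Int) * ((P : Nat) : Int)) = (((j * P : Nat)) : Int) from by
          push_cast; ring]
        exact PySem.List.slice_natCast_add s (j * P) P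
      have hcore := pv_core s (s.take P) P (by simp) N 0
      simp only [Nat.zero_mul, List.drop_zero, Nat.zero_add] at hcore
      rw [Bool.eq_iff_iff]
      simp only [List.all_eq_true, beq_iff_eq, e1, e2, e3]
      rw [hcore]
      constructor
      · intro hall j _ hj2
        by_cases hj0 : j = 0
        · simp [hj0]
        · have hmem : ((j : Int)) ∈ PySem.List.pyRange 1 n := by
            rw [PySem.List.mem_pyRange_one]
            constructor
            · exact_mod_cast Nat.one_le_iff_ne_zero.mpr hj0
            · rw [hnN]; exact_mod_cast hj2
          have hj := hall _ hmem
          rw [eb j] at hj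
          exact hj.symm
      · intro hall k hk
        rw [PySem.List.mem_pyRange_one] at hk
        have hkj : k = ((k.toNat : Nat) : Int) := by omega
        have hjN : k.toNat < N := by omega
        rw [hkj, eb k.toNat]
        exact (hall k.toNat (Nat.zero_le _) hjN).symm
    · -- partition_len < 0 : every loop slice is empty
      have hq1 : 1 ≤ (-p).toNat := by omega
      set q := (-p).toNat with hqdef
      have hpq : p = -(q : Int) := by omega
      have e1 : PySem.List.slice s (some 0) (some p) = s.take (s.length - q) := by
        rw [PySem.List.slice_zero_start, pv_slice_to_cases, if_neg (by omega)]
      have e2 : PySem.List.slice s none (some p) = s.take (s.length - q) := by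
        rw [pv_slice_to_cases, if_neg (by omega)]
      have e3 : PySem.List.slice s none (some (p * n)) = s.take (s.length - N * q) := by
        rw [pv_slice_to_cases, if_neg (by exact not_le.mpr (mul_neg_of_neg_of_pos hp0 hn))]
        congr 1
        have hm : -(p * n) = ((N * q : Nat) : Int) := by rw [hpq, hnN]; push_cast; ring
        rw [hm]
        omega
      have eblock : ∀ k : Int, 1 ≤ k →
          PySem.List.slice s (some (k * p)) (some (k * p + p)) = [] := by
        intro k hk
        have hkp : k * p ≤ 1 * p := mul_le_mul_of_nonpos_right hk (le_of_lt hp0)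
        exact pv_slice_nil_of_le s (by omega) (Or.inl (by omega))
      rw [Bool.eq_iff_iff]
      simp only [List.all_eq_true, beq_iff_eq, e1, e2, e3]
      by_cases hLq : s.length ≤ q
      · -- the first partition is already empty: both sides are trivially true
        have hnil : s.take (s.length - q) = [] := by
          rw [Nat.sub_eq_zero_of_le hLq]; simp
        have hnil2 : s.take (s.length - N * q) = [] := by
          have hq' : q ≤ N * q := Nat.le_mul_of_pos_left q hNpos
          rw [Nat.sub_eq_zero_of_le (by omega)]; simp
        constructor
        · intro _
          rw [hnil, hnil2]
          simp
        · intro _ x hx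
          rw [PySem.List.mem_pyRange_one] at hx
          rw [eblock x (by omega), hnil]
      · rcases eq_or_lt_of_le (by omega : 1 ≤ N) with hN1 | hN2
        · -- n = 1 : A's loop is empty; B compares first with itself
          have hn1 : n = 1 := by omega
          constructor
          · intro _
            rw [← hN1]
            simp
          · intro _ x hx
            rw [PySem.List.mem_pyRange_one, hn1] at hx
            omega
        · -- n ≥ 2 with a nonempty first partition: A fails at k = 1, B fails on length
          constructor
          · intro hall
            exfalso
            have h1 : (1 : Int) ∈ PySem.List.pyRange 1 n := by
              rw [PySem.List.mem_pyRange_one]; omega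
            have hx := hall 1 h1
            rw [eblock 1 (le_refl 1)] at hx
            rw [List.take_eq_nil_iff] at hx
            rcases hx with hx | hx
            · omega
            · rw [hx] at hLq; simp at hLq
          · intro heq
            exfalso
            have hlen := congrArg List.length heq
            rw [pv_flatten_replicate_length] at hlen
            simp only [List.length_take] at hlen
            rw [min_eq_left (Nat.sub_le _ _)] at hlen
            have h2q : 2 * (s.length - q) ≤ N * (s.length - q) :=
              Nat.mul_le_mul_right _ hN2
            have hq' : q ≤ N * q := Nat.le_mul_of_pos_left q hNpos
            omega

theorem compare_substrings_changed : Claim_changed_compare_substrings := by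
  unfold Claim_changed_compare_substrings; decide

theorem compare_substrings_tight : Claim_exact_compare_substrings := by
  intro size string n _ _ hD
  rcases hD with ⟨hn, hor⟩
  simp only [compare_substrings, pv_alt_unfold, pv_loopA_all]
  set s := string.toList with hs
  set p := PySem.Int.truncdiv size n with hp
  have hpt : p = Int.tdiv size n := rfl
  have hA : (PySem.List.pyRange 1 n).all (fun k =>
      PySem.List.slice s (some 0) (some p) ==
        PySem.List.slice s (some (k * p)) (some (k * p + p))) = true := by
    rw [List.all_eq_true]
    intro x hx
    rw [PySem.List.mem_pyRange_one] at hx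
    omega
  have hNn : n.toNat = 0 := by omega
  have hne : PySem.List.slice s none (some (p * n)) ≠ [] := by
    rw [pv_slice_to_cases, hpt]
    rcases hor with ⟨hm, hsne⟩ | ⟨hm, hL⟩
    · rw [if_pos (le_of_lt hm)]
      simp only [ne_eq, List.take_eq_nil_iff]
      push Not
      exact ⟨by omega, hsne⟩
    · rw [if_neg (by omega)]
      simp only [ne_eq, List.take_eq_nil_iff]
      push Not
      constructor
      · omega
      · intro h; rw [h] at hL; simp at hL; omega
  rw [hA, hNn]
  simp only [List.replicate, List.flatten_nil]
  intro hcon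
  exact hne (by simpa using hcon.symm)
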